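-- pv_equiv track=rewrite | github.com/swgemu/Core3 | MMOCoreORB/cmake/cmake_ninja_wrapper.py | ninjafy_argv
-- ===== SOURCE A (Python) =====
-- def ninjafy_argv(original):
--     """Replace Unix Makefiles generator with Ninja"""
--     processed = []
--     next_g = False
--     for a in original:
--         if a == '-G':
--             next_g = True
--         elif next_g and 'Unix Makefiles' in a:
--             a = a.replace('Unix Makefiles', 'Ninja')
--
--         processed.append(a)
--
--     return processed
-- ===== SOURCE B (Python) =====
-- def ninjafy_argv(original):
--     """Replace Unix Makefiles generator with Ninja"""
--     if '-G' not in original: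
--         return list(original)
--     i = original.index('-G')
--     tail = [a.replace('Unix Makefiles', 'Ninja') if 'Unix Makefiles' in a else a
--             for a in original[i + 1:]]
--     return original[:i + 1] + tail
-- ===== Notes on version B (the rewrite author's own statement) =====
-- stated objective: simpler
-- what changed: Replaces the stateful single-pass flag loop by a locate-then-transform decomposition: find the first '-G', keep the prefix verbatim, and map the replacement over the tail.
import Mathlib
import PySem

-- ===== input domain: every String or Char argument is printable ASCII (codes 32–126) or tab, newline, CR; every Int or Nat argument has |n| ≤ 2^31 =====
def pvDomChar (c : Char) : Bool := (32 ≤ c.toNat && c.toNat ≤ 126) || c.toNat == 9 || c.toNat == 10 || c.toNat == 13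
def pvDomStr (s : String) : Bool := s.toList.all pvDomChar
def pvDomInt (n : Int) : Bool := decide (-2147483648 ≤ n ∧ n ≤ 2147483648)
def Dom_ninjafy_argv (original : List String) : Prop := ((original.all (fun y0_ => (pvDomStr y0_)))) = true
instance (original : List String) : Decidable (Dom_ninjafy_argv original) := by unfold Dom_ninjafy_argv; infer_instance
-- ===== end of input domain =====

-- B replaces A's stateful flag loop by a locate-then-transform decomposition (same cost, simpler).

-- ===== PORT A =====
-- A's loop: processed list plus a never-reset flag next_g, one append per element.
def ninjafy_argv (original : List String) : List String :=
  (original.foldl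
    (fun (st : List String × Bool) (a : String) =>
      if a = "-G" then (st.1 ++ [a], true)
      else if st.2 && PySem.Str.isIn "Unix Makefiles" a then
        (st.1 ++ [PySem.Str.replace a "Unix Makefiles" "Ninja"], st.2)
      else (st.1 ++ [a], st.2))
    ([], false)).1

-- ===== PORT B =====
-- B: locate the first '-G'; keep the prefix verbatim, map the replacement over the tail.
def ninjafy_argv_alt (original : List String) : List String :=
  match PySem.List.index? original "-G" with
  | none => original
  | some i =>
      original.take (i + 1) ++
        (original.drop (i + 1)).map
          (fun a => if PySem.Str.isIn "Unix Makefiles" a then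
              PySem.Str.replace a "Unix Makefiles" "Ninja" else a)

-- ===== PRECONDITION & SPEC =====
def Spec_ninjafy_argv (original : List String) (out : List String) : Prop := out = ninjafy_argv_alt original
instance (original : List String) (out : List String) : Decidable (Spec_ninjafy_argv original out) := by unfold Spec_ninjafy_argv; infer_instance

-- ===== CLAIM (what is proved, stated in full; the proofs are below) =====
def Claim_equal_ninjafy_argv : Prop := ∀ (original : List String), Dom_ninjafy_argv original → Spec_ninjafy_argv original (ninjafy_argv original)

-- ===== LEMMAS AND PROOFS =====

-- the tail transformation both programs apply after the first '-G'
def pvF (a : String) : String :=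
  if PySem.Str.isIn "Unix Makefiles" a then PySem.Str.replace a "Unix Makefiles" "Ninja" else a

-- A's step function, named for the lemmas
def pvStep (st : List String × Bool) (a : String) : List String × Bool :=
  if a = "-G" then (st.1 ++ [a], true)
  else if st.2 && PySem.Str.isIn "Unix Makefiles" a then
    (st.1 ++ [PySem.Str.replace a "Unix Makefiles" "Ninja"], st.2)
  else (st.1 ++ [a], st.2)

-- once the flag is set it never resets: the rest is a map of pvF
lemma pvFoldl_true (l : List String) (acc : List String) :
    l.foldl pvStep (acc, true) = (acc ++ l.map pvF, true) := by
  induction l generalizing acc with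
  | nil => simp
  | cons a l ih =>
    by_cases hG : a = "-G"
    · subst hG
      have h0 : PySem.Str.isIn "Unix Makefiles" "-G" = false := by decide
      simp only [List.foldl_cons, pvStep]
      rw [if_pos trivial, ih]
      simp at h0
      simp [pvF, h0]
    · simp only [List.foldl_cons, pvStep, if_neg hG, Bool.true_and]
      split_ifs with hin <;> rw [ih] <;>
        simp at hin <;> simp [pvF, hin]

-- recursive characterization shared by both programs
def pvAux : List String → List String
  | [] => []
  | a :: l => if a = "-G" then a :: l.map pvF else a :: pvAux l

lemma pvA_eq_aux (l : List String) (acc : List String) :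
    (l.foldl pvStep (acc, false)).1 = acc ++ pvAux l := by
  induction l generalizing acc with
  | nil => simp [pvAux]
  | cons a l ih =>
    by_cases hG : a = "-G"
    · subst hG
      simp [List.foldl_cons, pvStep, pvAux, pvFoldl_true]
    · simp [List.foldl_cons, pvStep, pvAux, hG, ih]

lemma pvB_eq_aux (l : List String) : ninjafy_argv_alt l = pvAux l := by
  induction l with
  | nil => rfl
  | cons a l ih =>
    by_cases hG : a = "-G"
    · subst hG
      unfold ninjafy_argv_alt
      rw [PySem.List.index?_cons_self]
      simp [pvAux, pvF]
    · rw [pvAux, if_neg hG]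
      have hcons := PySem.List.index?_cons_of_ne (x := a) (xs := l) (v := "-G") hG
      cases h : PySem.List.index? l "-G" with
      | none =>
        rw [h] at hcons; simp only [Option.map_none] at hcons
        rw [← ih]; unfold ninjafy_argv_alt; rw [hcons, h]
      | some i =>
        rw [h] at hcons; simp only [Option.map_some] at hcons
        rw [← ih]; unfold ninjafy_argv_alt; rw [hcons, h]
        simp [List.take_succ_cons, List.drop_succ_cons]

-- ===== VERDICT (by name: the statement is the Claim_ definition above) =====
theorem ninjafy_argv_spec : Claim_equal_ninjafy_argv := by
  intro original _
  show ninjafy_argv original = ninjafy_argv_alt original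
  rw [pvB_eq_aux]
  have h : ninjafy_argv original = (original.foldl pvStep ([], false)).1 := rfl
  rw [h, pvA_eq_aux original []]
  simp
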